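-- pv_equiv track=rewrite | github.com/Ambroisie/SECOS | eval_decompounding.py | getIdx
-- ===== SOURCE A (Python) =====
-- from typing import Set, Tuple, cast
--
-- def getIdx(w: str) -> Set[int]:
--     ws = w.split("-")
--     i = 0
--     idx = set()
--     for s in ws:
--         i += len(s)
--         idx.add(i)
--     return idx
-- ===== SOURCE B (Python) =====
-- def getIdx(w: str):
--     cnt = 0
--     idx = set()
--     for ch in w:
--         if ch == "-":
--             idx.add(cnt)
--         else:
--             cnt += 1
--     idx.add(cnt)
--     return idx
-- ===== Notes on version B (the rewrite author's own statement) =====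
-- stated objective: simpler
-- what changed: B drops the split('-') pass and the intermediate segment list: a single character scan keeps a running count of non-hyphen characters and records it at each hyphen and once at the end.
import Mathlib
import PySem

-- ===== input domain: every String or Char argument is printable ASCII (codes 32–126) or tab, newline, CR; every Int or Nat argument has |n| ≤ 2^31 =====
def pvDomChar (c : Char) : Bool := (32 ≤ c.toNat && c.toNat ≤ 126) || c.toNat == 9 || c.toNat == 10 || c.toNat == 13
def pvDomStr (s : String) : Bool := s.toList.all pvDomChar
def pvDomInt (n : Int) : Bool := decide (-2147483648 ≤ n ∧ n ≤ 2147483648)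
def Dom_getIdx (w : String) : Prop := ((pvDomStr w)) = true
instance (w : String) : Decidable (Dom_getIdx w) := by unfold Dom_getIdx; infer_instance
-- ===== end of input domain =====

-- B replaces A's split('-')-and-sum pass with a single character scan keeping a running non-hyphen count (simpler decomposition; same return value).


-- ===== PORT A =====
-- loop body of A: i += len(s); idx.add(i)
def stepA (st : Int × PySem.Set Int) (s : List Char) : Int × PySem.Set Int :=
  (st.1 + (s.length : Int), PySem.Set.add st.2 (st.1 + (s.length : Int)))

def getIdx (w : String) : List Int :=
  let ws := PySem.Chars.splitOn w.toList ['-']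
  (ws.foldl stepA (0, PySem.Set.empty)).2

-- ===== PORT B =====
-- loop body of B: if ch == '-': idx.add(cnt) else: cnt += 1
def stepB (st : Int × PySem.Set Int) (c : Char) : Int × PySem.Set Int :=
  if c = '-' then (st.1, PySem.Set.add st.2 st.1) else (st.1 + 1, st.2)

def getIdx_alt (w : String) : List Int :=
  let r := w.toList.foldl stepB (0, PySem.Set.empty)
  PySem.Set.add r.2 r.1

-- ===== PRECONDITION & SPEC =====
def Spec_getIdx (w : String) (out : List Int) : Prop := out = getIdx_alt w
instance (w : String) (out : List Int) : Decidable (Spec_getIdx w out) := by unfold Spec_getIdx; infer_instance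

-- ===== CLAIM (what is proved, stated in full; the proofs are below) =====
def Claim_equal_getIdx : Prop := ∀ (w : String), Dom_getIdx w → Spec_getIdx w (getIdx w)

-- ===== LEMMAS AND PROOFS =====

-- structural reference for split on a single '-' (always returns a nonempty list)
def split1 : List Char → List (List Char)
  | [] => [[]]
  | c :: rest =>
    if c = '-' then [] :: split1 rest
    else
      match split1 rest with
      | [] => [[c]]
      | h :: t => (c :: h) :: t

theorem split1_ne_nil (cs : List Char) : split1 cs ≠ [] := by
  cases cs with
  | nil => simp [split1]
  | cons c rest =>
    simp only [split1]
    split_ifs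
    · simp
    · cases h : split1 rest <;> simp

def consHead (pre : List Char) : List (List Char) → List (List Char)
  | [] => []
  | h :: t => (pre ++ h) :: t

theorem go_eq (fuel : Nat) : ∀ (l cur : List Char) (acc : List (List Char)),
    l.length < fuel →
    PySem.Chars.splitOn.go ['-'] fuel l cur acc
      = acc.reverse ++ consHead cur.reverse (split1 l) := by
  induction fuel with
  | zero => intro l cur acc h; omega
  | succ k ih =>
    intro l cur acc h
    cases l with
    | nil => simp [PySem.Chars.splitOn.go, split1, consHead]
    | cons c rest =>
      by_cases hc : c = '-'
      · subst hc
        have hp : List.isPrefixOf ['-'] ('-' :: rest) = true := by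
          simp [List.isPrefixOf]
        rw [PySem.Chars.splitOn.go]
        simp only [hp, if_true]
        rw [ih _ _ _ (by simpa using Nat.lt_of_succ_lt_succ h)]
        simp only [split1, if_true, consHead, List.reverse_cons, List.reverse_nil,
          List.nil_append, List.append_assoc, List.singleton_append]
        cases hs : split1 rest with
        | nil => exact absurd hs (split1_ne_nil rest)
        | cons h t => simp [hs]
      · have hp : List.isPrefixOf ['-'] (c :: rest) = false := by
          simp only [List.isPrefixOf]
          simp only [Bool.and_eq_false_iff, beq_eq_false_iff_ne, ne_eq]
          exact Or.inl fun hh => hc hh.symm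
        rw [PySem.Chars.splitOn.go]
        simp only [hp, Bool.false_eq_true, if_false]
        rw [ih _ _ _ (by simpa using Nat.lt_of_succ_lt_succ h)]
        simp only [split1, hc, if_false, List.reverse_cons]
        cases hs : split1 rest with
        | nil => exact absurd hs (split1_ne_nil rest)
        | cons h t => simp [consHead]

theorem splitOn_eq_split1 (cs : List Char) :
    PySem.Chars.splitOn cs ['-'] = split1 cs := by
  have := go_eq (cs.length + 1) cs [] [] (by omega)
  simp only [PySem.Chars.splitOn] at *
  rw [this]
  cases hs : split1 cs with
  | nil => exact absurd hs (split1_ne_nil cs)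
  | cons h t => simp [consHead]

theorem main_fold (cs : List Char) : ∀ (i : Int) (idx : List Int),
    ((split1 cs).foldl stepA (i, idx)).2
      = PySem.Set.add (cs.foldl stepB (i, idx)).2 (cs.foldl stepB (i, idx)).1 := by
  induction cs with
  | nil => intro i idx; simp [split1, stepA]
  | cons c rest ih =>
    intro i idx
    by_cases hc : c = '-'
    · subst hc
      simp only [split1, if_true, List.foldl_cons, stepA, stepB, if_true]
      have : (i + ((([] : List Char)).length : Int)) = i := by simp
      simp only [List.length_nil, Int.natCast_zero, add_zero]
      exact ih i (PySem.Set.add idx i)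
    · simp only [split1, hc, if_false]
      cases hs : split1 rest with
      | nil => exact absurd hs (split1_ne_nil rest)
      | cons h t =>
        have key : ((c :: h) :: t).foldl stepA (i, idx)
            = (h :: t).foldl stepA (i + 1, idx) := by
          simp only [List.foldl_cons, stepA, List.length_cons]
          have : i + ((h.length + 1 : Nat) : Int) = i + 1 + (h.length : Int) := by
            push_cast; ring
          rw [this]
        rw [key, ← hs, ih (i + 1) idx]
        simp [stepB, hc]

-- ===== VERDICT (by name: the statement is the Claim_ definition above) =====
theorem getIdx_spec : Claim_equal_getIdx := by
  intro w _
  show getIdx w = getIdx_alt w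
  unfold getIdx getIdx_alt
  rw [splitOn_eq_split1]
  exact main_fold w.toList 0 PySem.Set.empty
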